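-- pv_equiv track=rewrite | github.com/SamarthMahendra/NeuCompCodingPython | Akuna/DP.py | optimize_schedule_dp
-- ===== SOURCE A (Python) =====
-- def optimize_schedule_dp(schedule, n):
--     total_sessions = len(schedule)
--
--     # If there aren't enough sessions for two shifts and a break, return 0
--     if total_sessions < 2 * n + 1:
--         return 0, [], schedule
--
--     # Create a prefix sum array for efficient range sum queries
--     prefix_sum = [0] * (total_sessions + 1)
--     for i in range(1, total_sessions + 1):
--         prefix_sum[i] = prefix_sum[i - 1] + schedule[i - 1]
--
--     # Function to get sum of a range [start, end) using prefix sum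
--     def range_sum(start, end):
--         return prefix_sum[end] - prefix_sum[start]
--
--     # dp[i] represents the maximum students Camille can teach
--     # if her first shift starts at index i
--     dp = [0] * (total_sessions - 2 * n)
--
--     for i in range(len(dp)):
--         first_shift = range_sum(i, i + n)
--         second_shift = range_sum(i + n + 1, i + 2 * n + 1)
--         dp[i] = first_shift + second_shift
--
--     # Find the starting index that gives maximum students
--     best_start = max(range(len(dp)), key=lambda i: dp[i])
--     max_students = dp[best_start]
--
--     # Construct Camille's and assistant's schedules
--     camille_sessions = schedule[best_start:best_start + n] + schedule[best_start + n + 1:best_start + 2 * n + 1]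
--     assistant_sessions = schedule[:best_start] + [schedule[best_start + n]] + schedule[best_start + 2 * n + 1:]
--
--     return max_students, camille_sessions, assistant_sessions
-- ===== SOURCE B (Python) =====
-- def optimize_schedule_dp(schedule, n):
--     total_sessions = len(schedule)
--
--     # Not enough sessions for two shifts and a break
--     if total_sessions < 2 * n + 1:
--         return 0, [], schedule
--
--     w = 2 * n + 1
--     # Sliding window of size w; score(i) = window_sum(i) - schedule[i + n]
--     window = sum(schedule[0:w])
--     best_score = window - schedule[n]
--     best_start = 0
--     for i in range(1, total_sessions - w + 1):
--         window += schedule[i + w - 1] - schedule[i - 1]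
--         score = window - schedule[i + n]
--         if score > best_score:
--             best_score = score
--             best_start = i
--
--     camille_sessions = schedule[best_start:best_start + n] + schedule[best_start + n + 1:best_start + w]
--     assistant_sessions = schedule[:best_start] + [schedule[best_start + n]] + schedule[best_start + w:]
--     return best_score, camille_sessions, assistant_sessions
-- ===== Notes on version B (the rewrite author's own statement) =====
-- stated objective: simpler
-- what changed: Replaced the prefix-sum array plus dp table plus argmax-over-range with a single sliding-window pass that maintains the running window sum and tracks the first maximal score directly.
import Mathlib
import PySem

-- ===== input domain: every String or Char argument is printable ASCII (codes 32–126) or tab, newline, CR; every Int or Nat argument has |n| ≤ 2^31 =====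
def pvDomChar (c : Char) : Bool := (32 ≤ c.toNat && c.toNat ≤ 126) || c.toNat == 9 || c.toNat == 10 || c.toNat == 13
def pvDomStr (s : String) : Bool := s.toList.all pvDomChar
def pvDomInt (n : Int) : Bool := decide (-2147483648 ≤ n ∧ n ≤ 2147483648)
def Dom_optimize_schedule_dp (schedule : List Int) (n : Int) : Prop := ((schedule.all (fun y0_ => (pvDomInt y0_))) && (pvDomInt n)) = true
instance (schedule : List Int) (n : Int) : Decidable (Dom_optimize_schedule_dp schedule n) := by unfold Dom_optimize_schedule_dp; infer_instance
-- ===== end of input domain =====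

-- B replaces A's prefix-sum array + dp table + argmax-over-range by one sliding-window pass
-- (running window sum, first strict maximum tracked on the fly); same O(len) cost, simpler.

-- ===== PORT A =====
-- A's inner helper range_sum(start, end) reading the prefix-sum list (exact: under Pre_ both indices are in range)
def pvRangeSum (prefixSum : List Int) (s e : Int) : Int :=
  PySem.List.pyGetD prefixSum e 0 - PySem.List.pyGetD prefixSum s 0

-- Literal port of A. `prefix_sum[i] = …` / `dp[i] = …` are List.set at i.toNat (each i in those loops
-- is ≥ 0, so .toNat is exact); `max(range(len(dp)), key=…)` is PySem.List.max? (first maximum) with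
-- `.getD 0` discharging the Option only — under Pre_ this branch runs with a nonempty range.
def optimize_schedule_dp (schedule : List Int) (n : Int) : Int × List Int × List Int :=
  let total : Int := schedule.length
  if total < 2 * n + 1 then (0, [], schedule)
  else
    let prefixSum := (PySem.List.pyRange 1 (total + 1)).foldl
      (fun ps i => ps.set i.toNat (PySem.List.pyGetD ps (i - 1) 0 + PySem.List.pyGetD schedule (i - 1) 0))
      (List.replicate (total + 1).toNat 0)
    let dpLen : Int := total - 2 * n
    let dp := (PySem.List.pyRange 0 dpLen).foldl
      (fun d i => d.set i.toNat (pvRangeSum prefixSum i (i + n) + pvRangeSum prefixSum (i + n + 1) (i + 2 * n + 1)))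
      (List.replicate dpLen.toNat 0)
    let best := (PySem.List.max? (PySem.List.pyRange 0 dpLen) (fun i => PySem.List.pyGetD dp i 0)).getD 0
    let maxStudents := PySem.List.pyGetD dp best 0
    let camille := PySem.List.slice schedule (some best) (some (best + n)) ++
                   PySem.List.slice schedule (some (best + n + 1)) (some (best + 2 * n + 1))
    let assistant := PySem.List.slice schedule none (some best) ++
                     [PySem.List.pyGetD schedule (best + n) 0] ++
                     PySem.List.slice schedule (some (best + 2 * n + 1)) none
    (maxStudents, camille, assistant)

-- ===== PORT B =====
-- Literal port of Source B: one fold over range(1, total-w+1) carrying (window, best_score, best_start).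
def optimize_schedule_dp_alt (schedule : List Int) (n : Int) : Int × List Int × List Int :=
  let total : Int := schedule.length
  if total < 2 * n + 1 then (0, [], schedule)
  else
    let w : Int := 2 * n + 1
    let window0 := (PySem.List.slice schedule (some 0) (some w)).sum
    let st := (PySem.List.pyRange 1 (total - w + 1)).foldl
      (fun (s : Int × Int × Int) i =>
        let window := s.1 + PySem.List.pyGetD schedule (i + w - 1) 0 - PySem.List.pyGetD schedule (i - 1) 0
        let score := window - PySem.List.pyGetD schedule (i + n) 0
        if s.2.1 < score then (window, score, i) else (window, s.2.1, s.2.2))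
      (window0, window0 - PySem.List.pyGetD schedule n 0, 0)
    let camille := PySem.List.slice schedule (some st.2.2) (some (st.2.2 + n)) ++
                   PySem.List.slice schedule (some (st.2.2 + n + 1)) (some (st.2.2 + w))
    let assistant := PySem.List.slice schedule none (some st.2.2) ++
                     [PySem.List.pyGetD schedule (st.2.2 + n) 0] ++
                     PySem.List.slice schedule (some (st.2.2 + w)) none
    (st.2.1, camille, assistant)

-- ===== PRECONDITION & SPEC =====
-- Pre_ excludes n < 0, on which Python A raises IndexError (its prefix-sum indices leave the array).
def Pre_optimize_schedule_dp (schedule : List Int) (n : Int) : Prop := 0 ≤ n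
instance (schedule : List Int) (n : Int) : Decidable (Pre_optimize_schedule_dp schedule n) := by unfold Pre_optimize_schedule_dp; infer_instance
def pvWitness_optimize_schedule_dp : List Int × Int := ([1, 2, 3, 4, 5], 1)

def Spec_optimize_schedule_dp (schedule : List Int) (n : Int) (out : Int × List Int × List Int) : Prop := out = optimize_schedule_dp_alt schedule n
instance (schedule : List Int) (n : Int) (out : Int × List Int × List Int) : Decidable (Spec_optimize_schedule_dp schedule n out) := by unfold Spec_optimize_schedule_dp; infer_instance

-- ===== CLAIM (what is proved, stated in full; the proofs are below) =====
def Claim_equal_optimize_schedule_dp : Prop := ∀ (schedule : List Int) (n : Int), Dom_optimize_schedule_dp schedule n → Pre_optimize_schedule_dp schedule n → Spec_optimize_schedule_dp schedule n (optimize_schedule_dp schedule n)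

-- ===== LEMMAS AND PROOFS =====

-- sum of the first j elements (prefix_sum[j])
def pvPref (s : List Int) (j : Nat) : Int := (s.take j).sum

-- the score both programs maximise, as a function of the (Int) start index
def pvKey (s : List Int) (N : Nat) : Int → Int :=
  fun i => (pvPref s (i.toNat + 2 * N + 1) - pvPref s i.toNat) - s.getD (i.toNat + N) 0

-- first-maximum scan: (best score, best start) over indices 0..k
def pvBP (key : Int → Int) : Nat → Int × Int
  | 0 => (key 0, 0)
  | k + 1 => if (pvBP key k).1 < key ((k : Int) + 1) then (key ((k : Int) + 1), (k : Int) + 1) else pvBP key k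

-- common output shape of both else-branches
def pvOut (s : List Int) (n best score : Int) : Int × List Int × List Int :=
  (score,
   PySem.List.slice s (some best) (some (best + n)) ++
   PySem.List.slice s (some (best + n + 1)) (some (best + 2 * n + 1)),
   PySem.List.slice s none (some best) ++
   [PySem.List.pyGetD s (best + n) 0] ++
   PySem.List.slice s (some (best + 2 * n + 1)) none)

lemma pvPref_succ (s : List Int) (j : Nat) (hj : j < s.length) :
    pvPref s (j + 1) = pvPref s j + s.getD j 0 := by
  unfold pvPref
  rw [List.take_add_one, List.sum_append, List.getElem?_eq_getElem hj]
  simp [List.getD, List.getElem?_eq_getElem hj]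

lemma pvBP_key (key : Int → Int) (k : Nat) : key (pvBP key k).2 = (pvBP key k).1 := by
  induction k with
  | zero => simp [pvBP]
  | succ k ih =>
    rw [pvBP]
    split_ifs with h <;> simp [ih]

lemma pvBP_congr (key₁ key₂ : Int → Int) (k : Nat)
    (h : ∀ j : Nat, j ≤ k → key₁ (j : Int) = key₂ (j : Int)) : pvBP key₁ k = pvBP key₂ k := by
  induction k with
  | zero => simpa [pvBP] using h 0 (le_refl 0)
  | succ k ih =>
    have hk : ∀ j : Nat, j ≤ k → key₁ (j : Int) = key₂ (j : Int) := fun j hj => h j (by omega)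
    have hkk : key₁ ((k : Int) + 1) = key₂ ((k : Int) + 1) := by
      have h2 := h (k + 1) (le_refl _)
      push_cast at h2
      exact h2
    rw [pvBP, pvBP, ih hk, hkk]

-- A's prefix-sum loop builds pvPref
lemma pvPrefix_fold (s : List Int) : ∀ (k : Nat), k ≤ s.length →
    (PySem.List.pyRange 1 ((k : Int) + 1)).foldl
      (fun ps i => ps.set i.toNat (PySem.List.pyGetD ps (i - 1) 0 + PySem.List.pyGetD s (i - 1) 0))
      (List.replicate (s.length + 1) 0)
    = (List.range (s.length + 1)).map (fun j => if j ≤ k then pvPref s j else 0)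
  | 0, _ => by
    rw [Nat.cast_zero, zero_add, show PySem.List.pyRange (1:Int) 1 = [] from by decide, List.foldl_nil]
    have h : ∀ j ∈ List.range (s.length + 1),
        (fun j => if j ≤ 0 then pvPref s j else 0) j = (fun _ => (0 : Int)) j := by
      intro j _
      by_cases hj : j ≤ 0
      · have : j = 0 := by omega
        subst this
        simp [pvPref]
      · simp [hj]
    rw [List.map_congr_left h, List.map_const', List.length_range]
  | (k + 1), hk => by
    have hk' : k ≤ s.length := by omega
    have e1 : ((k + 1 : Nat) : Int) + 1 = ((k : Int) + 1) + 1 := by push_cast; ring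
    rw [e1, PySem.List.pyRange_one_succ_right (by omega), List.foldl_append,
      pvPrefix_fold s k hk']
    simp only [List.foldl_cons, List.foldl_nil]
    have e2 : ((k : Int) + 1) - 1 = ((k : Nat) : Int) := by ring
    have e3 : ((k : Int) + 1) = (((k + 1 : Nat)) : Int) := by push_cast; ring
    rw [e2, e3, Int.toNat_natCast, PySem.List.pyGetD_natCast, PySem.List.pyGetD_natCast,
      PySem.List.getD_map_range (fun j => if j ≤ k then pvPref s j else 0) (s.length + 1) k 0 (by omega),
      if_pos (le_refl k), ← pvPref_succ s k (by omega)]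
    apply List.ext_getElem (by simp)
    intro i h1 h2
    rw [List.getElem_set]
    simp only [List.getElem_map, List.getElem_range]
    by_cases hik : k + 1 = i
    · subst hik
      simp
    · rw [if_neg hik]
      by_cases h3 : i ≤ k
      · rw [if_pos h3, if_pos (by omega)]
      · rw [if_neg h3, if_neg (by omega)]

-- pure tabulation: A's dp loop
lemma pvTab_fold (f : Int → Int) (M : Nat) : ∀ (k : Nat), k ≤ M →
    (PySem.List.pyRange 0 (k : Int)).foldl (fun d i => d.set i.toNat (f i)) (List.replicate M 0)
    = (List.range M).map (fun j => if j < k then f (j : Int) else 0)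
  | 0, _ => by
    rw [Nat.cast_zero, show PySem.List.pyRange (0:Int) 0 = [] from by decide, List.foldl_nil]
    have h : ∀ j ∈ List.range M,
        (fun (j : Nat) => if j < 0 then f (j : Int) else 0) j = (fun _ => (0 : Int)) j := by
      intro j _
      simp
    rw [List.map_congr_left h, List.map_const', List.length_range]
  | (k + 1), hk => by
    have hk' : k ≤ M := by omega
    rw [Nat.cast_add, Nat.cast_one, PySem.List.pyRange_one_succ_right (by omega), List.foldl_append,
      pvTab_fold f M k hk']
    simp only [List.foldl_cons, List.foldl_nil]
    rw [Int.toNat_natCast]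
    apply List.ext_getElem (by simp)
    intro i h1 h2
    rw [List.getElem_set]
    simp only [List.getElem_map, List.getElem_range]
    by_cases hik : k = i
    · subst hik
      simp
    · rw [if_neg hik]
      by_cases h3 : i < k
      · rw [if_pos h3, if_pos (by omega)]
      · rw [if_neg h3, if_neg (by omega)]

-- A's max(range(len(dp)), key=...) is the first-maximum scan
lemma pvMaxAux (key : Int → Int) (g : Option Int → Int → Option Int)
    (hg : ∀ m x, g (some m) x = if key m < key x then some x else some m) : ∀ (k : Nat),
    (PySem.List.pyRange 1 ((k : Int) + 1)).foldl g (some 0)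
    = some (pvBP key k).2
  | 0 => by
    rw [Nat.cast_zero, zero_add, show PySem.List.pyRange (1:Int) 1 = [] from by decide, List.foldl_nil]
    rfl
  | (k + 1) => by
    have e1 : ((k + 1 : Nat) : Int) + 1 = ((k : Int) + 1) + 1 := by push_cast; ring
    rw [e1, PySem.List.pyRange_one_succ_right (by omega), List.foldl_append, pvMaxAux key g hg k]
    simp only [List.foldl_cons, List.foldl_nil]
    rw [hg, pvBP_key key k]
    conv_rhs => rw [pvBP]
    split_ifs with h <;> simp

lemma pvMax_fold (key : Int → Int) (k : Nat) :
    PySem.List.max? (PySem.List.pyRange 0 ((k : Int) + 1)) key = some (pvBP key k).2 := by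
  unfold PySem.List.max?
  rw [PySem.List.pyRange_one_cons (by omega), zero_add, List.foldl_cons]
  exact pvMaxAux key _ (fun m x => rfl) k

-- B's sliding-window loop: window sum plus first-maximum scan
lemma pvB_fold (s : List Int) (N : Nat) (hNL : 2 * N + 1 ≤ s.length) : ∀ (k : Nat), k ≤ s.length - 2 * N - 1 →
    (PySem.List.pyRange 1 ((k : Int) + 1)).foldl
      (fun (st : Int × Int × Int) i =>
        if st.2.1 < st.1 + PySem.List.pyGetD s (i + (2 * (N : Int) + 1) - 1) 0 - PySem.List.pyGetD s (i - 1) 0 - PySem.List.pyGetD s (i + (N : Int)) 0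
        then (st.1 + PySem.List.pyGetD s (i + (2 * (N : Int) + 1) - 1) 0 - PySem.List.pyGetD s (i - 1) 0,
              st.1 + PySem.List.pyGetD s (i + (2 * (N : Int) + 1) - 1) 0 - PySem.List.pyGetD s (i - 1) 0 - PySem.List.pyGetD s (i + (N : Int)) 0, i)
        else (st.1 + PySem.List.pyGetD s (i + (2 * (N : Int) + 1) - 1) 0 - PySem.List.pyGetD s (i - 1) 0, st.2.1, st.2.2))
      ((s.take (2 * N + 1)).sum, (s.take (2 * N + 1)).sum - s.getD N 0, 0)
    = (pvPref s (k + 2 * N + 1) - pvPref s k, pvBP (pvKey s N) k)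
  | 0, _ => by
    rw [Nat.cast_zero, zero_add, show PySem.List.pyRange (1:Int) 1 = [] from by decide, List.foldl_nil]
    simp [pvBP, pvKey, pvPref]
  | (k + 1), hk => by
    have hk' : k ≤ s.length - 2 * N - 1 := by omega
    have e1 : ((k + 1 : Nat) : Int) + 1 = ((k : Int) + 1) + 1 := by push_cast; ring
    rw [e1, PySem.List.pyRange_one_succ_right (by omega), List.foldl_append,
      pvB_fold s N hNL k hk']
    simp only [List.foldl_cons, List.foldl_nil]
    have i1 : ((k : Int) + 1) + (2 * (N : Int) + 1) - 1 = ((k + 2 * N + 1 : Nat) : Int) := by push_cast; ring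
    have i2 : ((k : Int) + 1) - 1 = ((k : Nat) : Int) := by ring
    have i3 : ((k : Int) + 1) + (N : Int) = ((k + 1 + N : Nat) : Int) := by push_cast; ring
    rw [i1, i2, i3, PySem.List.pyGetD_natCast s (k + 2 * N + 1) 0, PySem.List.pyGetD_natCast s k 0,
      PySem.List.pyGetD_natCast s (k + 1 + N) 0]
    have w1 : pvPref s (k + 2 * N + 1) - pvPref s k + s.getD (k + 2 * N + 1) 0 - s.getD k 0
        = pvPref s (k + 1 + 2 * N + 1) - pvPref s (k + 1) := by
      have e4 : k + 1 + 2 * N + 1 = (k + 2 * N + 1) + 1 := by omega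
      rw [e4, pvPref_succ s (k + 2 * N + 1) (by omega), pvPref_succ s k (by omega)]
      ring
    rw [w1]
    have w2 : pvPref s (k + 1 + 2 * N + 1) - pvPref s (k + 1) - s.getD (k + 1 + N) 0
        = pvKey s N ((k : Int) + 1) := by
      simp only [pvKey]
      rw [show ((k : Int) + 1).toNat = k + 1 from by omega]
    rw [w2]
    conv_rhs => rw [pvBP]
    split_ifs with h <;> simp

lemma pvA_closed (s : List Int) (n : Int) (hn : 0 ≤ n)
    (hg : ¬((s.length : Int) < 2 * n + 1)) :
    optimize_schedule_dp s n =
      pvOut s n (pvBP (pvKey s n.toNat) (s.length - 2 * n.toNat - 1)).2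
                (pvBP (pvKey s n.toNat) (s.length - 2 * n.toNat - 1)).1 := by
  obtain ⟨N, rfl⟩ : ∃ N : Nat, n = (N : Int) := ⟨n.toNat, (Int.toNat_of_nonneg hn).symm⟩
  rw [Int.toNat_natCast]
  have hNL : 2 * N + 1 ≤ s.length := by omega
  simp only [optimize_schedule_dp, if_neg hg]
  have h1 : ((s.length : Int) + 1).toNat = s.length + 1 := by omega
  rw [h1, pvPrefix_fold s s.length (le_refl _)]
  have hP : (List.range (s.length + 1)).map (fun j => if j ≤ s.length then pvPref s j else 0)
      = (List.range (s.length + 1)).map (fun j => pvPref s j) := by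
    apply List.map_congr_left
    intro j hj
    rw [List.mem_range] at hj
    rw [if_pos (by omega)]
  rw [hP]
  have hM : ((s.length : Int) - 2 * (N : Int)) = ((s.length - 2 * N : Nat) : Int) := by omega
  rw [hM, Int.toNat_natCast,
    pvTab_fold (fun i => pvRangeSum ((List.range (s.length + 1)).map (fun j => pvPref s j)) i (i + (N : Int))
      + pvRangeSum ((List.range (s.length + 1)).map (fun j => pvPref s j)) (i + (N : Int) + 1) (i + 2 * (N : Int) + 1))
      (s.length - 2 * N) (s.length - 2 * N) (le_refl _)]
  have hdp : (List.range (s.length - 2 * N)).map (fun j => if j < s.length - 2 * N then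
        pvRangeSum ((List.range (s.length + 1)).map (fun j => pvPref s j)) (j : Int) ((j : Int) + (N : Int))
        + pvRangeSum ((List.range (s.length + 1)).map (fun j => pvPref s j)) ((j : Int) + (N : Int) + 1) ((j : Int) + 2 * (N : Int) + 1) else 0)
      = (List.range (s.length - 2 * N)).map (fun (j : Nat) => pvKey s N (j : Int)) := by
    apply List.map_congr_left
    intro j hj
    rw [List.mem_range] at hj
    rw [if_pos hj]
    simp only [pvRangeSum]
    have c3 : ((j : Int) + 2 * (N : Int) + 1) = ((j + 2 * N + 1 : Nat) : Int) := by push_cast; ring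
    have c2 : ((j : Int) + (N : Int) + 1) = ((j + N + 1 : Nat) : Int) := by push_cast; ring
    have c1 : ((j : Int) + (N : Int)) = ((j + N : Nat) : Int) := by push_cast; ring
    rw [c3, c2, c1, PySem.List.pyGetD_natCast, PySem.List.pyGetD_natCast, PySem.List.pyGetD_natCast,
      PySem.List.pyGetD_natCast,
      PySem.List.getD_map_range (fun j => pvPref s j) (s.length + 1) (j + N) 0 (by omega),
      PySem.List.getD_map_range (fun j => pvPref s j) (s.length + 1) j 0 (by omega),
      PySem.List.getD_map_range (fun j => pvPref s j) (s.length + 1) (j + 2 * N + 1) 0 (by omega),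
      PySem.List.getD_map_range (fun j => pvPref s j) (s.length + 1) (j + N + 1) 0 (by omega)]
    simp only [pvKey, Int.toNat_natCast]
    rw [pvPref_succ s (j + N) (by omega)]
    ring
  rw [hdp]
  have hM1 : ((s.length - 2 * N : Nat) : Int) = ((s.length - 2 * N - 1 : Nat) : Int) + 1 := by omega
  rw [hM1,
    pvMax_fold (fun i => PySem.List.pyGetD ((List.range (s.length - 2 * N)).map (fun (j : Nat) => pvKey s N (j : Int))) i 0)
      (s.length - 2 * N - 1),
    Option.getD_some]
  have hms : PySem.List.pyGetD ((List.range (s.length - 2 * N)).map (fun (j : Nat) => pvKey s N (j : Int)))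
      ((pvBP (fun i => PySem.List.pyGetD ((List.range (s.length - 2 * N)).map (fun (j : Nat) => pvKey s N (j : Int))) i 0) (s.length - 2 * N - 1)).2) 0
      = (pvBP (fun i => PySem.List.pyGetD ((List.range (s.length - 2 * N)).map (fun (j : Nat) => pvKey s N (j : Int))) i 0) (s.length - 2 * N - 1)).1 :=
    pvBP_key (fun i => PySem.List.pyGetD ((List.range (s.length - 2 * N)).map (fun (j : Nat) => pvKey s N (j : Int))) i 0) (s.length - 2 * N - 1)
  rw [hms]
  have hcong : pvBP (fun i => PySem.List.pyGetD ((List.range (s.length - 2 * N)).map (fun (j : Nat) => pvKey s N (j : Int))) i 0) (s.length - 2 * N - 1)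
      = pvBP (pvKey s N) (s.length - 2 * N - 1) := by
    apply pvBP_congr
    intro j hj
    rw [PySem.List.pyGetD_natCast,
      PySem.List.getD_map_range (fun (j : Nat) => pvKey s N (j : Int)) (s.length - 2 * N) j 0 (by omega)]
  rw [hcong]
  rfl

lemma pvB_closed (s : List Int) (n : Int) (hn : 0 ≤ n)
    (hg : ¬((s.length : Int) < 2 * n + 1)) :
    optimize_schedule_dp_alt s n =
      pvOut s n (pvBP (pvKey s n.toNat) (s.length - 2 * n.toNat - 1)).2
                (pvBP (pvKey s n.toNat) (s.length - 2 * n.toNat - 1)).1 := by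
  obtain ⟨N, rfl⟩ : ∃ N : Nat, n = (N : Int) := ⟨n.toNat, (Int.toNat_of_nonneg hn).symm⟩
  rw [Int.toNat_natCast]
  have hNL : 2 * N + 1 ≤ s.length := by omega
  simp only [optimize_schedule_dp_alt, if_neg hg]
  have hw : PySem.List.slice s (some 0) (some (2 * (N : Int) + 1)) = s.take (2 * N + 1) := by
    rw [show (2 * (N : Int) + 1) = ((2 * N + 1 : Nat) : Int) from by push_cast; ring,
      PySem.List.slice_zero_start, PySem.List.slice_to_natCast]
  rw [hw, PySem.List.pyGetD_natCast s N 0]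
  have hrange : ((s.length : Int) - (2 * (N : Int) + 1) + 1) = ((s.length - 2 * N - 1 : Nat) : Int) + 1 := by
    omega
  rw [hrange, pvB_fold s N hNL (s.length - 2 * N - 1) (le_refl _)]
  simp only [pvOut]
  have hb : ∀ b : Int, b + (2 * (N : Int) + 1) = b + 2 * (N : Int) + 1 := fun b => by ring
  simp only [hb]

-- ===== VERDICT (by name: the statement is the Claim_ definition above) =====
theorem optimize_schedule_dp_spec : Claim_equal_optimize_schedule_dp := by
  intro s n _ hpre
  unfold Spec_optimize_schedule_dp
  by_cases hg : ((s.length : Int) < 2 * n + 1)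
  · simp only [optimize_schedule_dp, optimize_schedule_dp_alt, if_pos hg]
  · rw [pvA_closed s n hpre hg, pvB_closed s n hpre hg]
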